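-- pv_equiv track=rewrite | github.com/BenLeong0/leetcode_etc | google_foobar/question4.2.py | solution
-- ===== SOURCE A (Python) =====
-- def solution(banana_list):
--     def gcd(x, y):
--        while(y):
--            x, y = y, x % y
--        return x
--
--     def can_pair(a,b):
--         while True:
--             if a == b:
--                 return False
--
--             g = gcd(a,b)
--             while g != 1:
--                 a //= g
--                 b //= g
--                 g = gcd(a,b)
--
--             if (a + b) % 2 == 1:
--                 return True
--             a, b = max(a,b), min(a,b)
--             a, b = a-b, 2*b
--         return True
--
--     # Find maximum matching
--     n = len(banana_list)
--     # matching = set()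
--     # covered = set()
--     adj = [set() for _ in range(n)]
--     for i in range(n):
--         for j in range(i+1,n):
--             if can_pair(banana_list[i],banana_list[j]):
--                 adj[i].add(j)
--                 adj[j].add(i)
--
--     def dfs(u, matching, visited):
--         for v in range(n):
--             if v in adj[u] and not visited[v]:
--                 visited[v] = True
--                 if matching[v] == -1 or dfs(matching[v], matching, visited):
--                     matching[v] = u
--                     return True
--         return False
--
--
--     matching = [-1] * n
--     number_of_pairs = 0
--     for u in range(n):
--         visited = [False] * n
--         if dfs(u,matching,visited):
--             number_of_pairs += 1
--
--     return n - 2*(number_of_pairs//2)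
-- ===== SOURCE B (Python) =====
-- def solution(banana_list):
--     # Simpler: no precomputed adjacency sets; the pairability test is a
--     # closed-form gcd/odd-part check evaluated directly inside the dfs.
--
--     def gcd(x, y):
--         while y:
--             x, y = y, x % y
--         return x
--
--     def can_pair2(a, b):
--         s = (a + b) // gcd(a, b)
--         while s % 2 == 0:
--             s //= 2
--         return s != 1
--
--     n = len(banana_list)
--
--     def dfs(u, matching, visited):
--         for v in range(n):
--             if not visited[v] and can_pair2(banana_list[u], banana_list[v]):
--                 visited[v] = True
--                 if matching[v] == -1 or dfs(matching[v], matching, visited):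
--                     matching[v] = u
--                     return True
--         return False
--
--     matching = [-1] * n
--     number_of_pairs = 0
--     for u in range(n):
--         visited = [False] * n
--         if dfs(u, matching, visited):
--             number_of_pairs += 1
--
--     return n - 2 * (number_of_pairs // 2)
-- ===== Notes on version B (the rewrite author's own statement) =====
-- stated objective: simpler
-- what changed: The per-pair infinite-loop simulation is replaced by the closed-form test '(a+b)//gcd(a,b) has an odd part > 1', and the precomputed adjacency sets are dropped entirely: the dfs evaluates this O(log) test directly, so no graph is materialised.
-- outside the precondition, e.g. on solution([0, 2]): A returns 0, B raises ZeroDivisionError; on solution([3, -1]): A returns 0, B returns 2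
import Mathlib
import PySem

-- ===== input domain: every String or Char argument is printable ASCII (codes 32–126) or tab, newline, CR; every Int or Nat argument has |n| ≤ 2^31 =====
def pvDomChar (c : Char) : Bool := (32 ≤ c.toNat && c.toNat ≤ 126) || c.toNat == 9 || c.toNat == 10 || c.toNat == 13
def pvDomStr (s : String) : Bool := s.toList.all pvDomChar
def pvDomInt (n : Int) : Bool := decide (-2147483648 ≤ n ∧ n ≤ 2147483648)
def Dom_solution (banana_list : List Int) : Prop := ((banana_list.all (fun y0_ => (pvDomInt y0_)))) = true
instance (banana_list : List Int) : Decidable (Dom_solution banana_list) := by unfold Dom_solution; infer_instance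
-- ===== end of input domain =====

-- B replaces A's per-pair infinite-loop simulation by a closed-form gcd/odd-part test and
-- drops the precomputed adjacency sets, evaluating the test directly inside the dfs (simpler).

-- ===== PORT A =====
-- gcd helper shared by both ports (A's and Source B's `gcd` are the identical Euclid loop):
-- `while(y): x, y = y, x % y`
def gcdA (x y : Int) : Int :=
  if hy : y = 0 then x else gcdA y (PySem.Int.mod x y)
termination_by y.natAbs
decreasing_by
  rcases lt_or_gt_of_ne hy with h | h
  · have h1 := PySem.Int.mod_neg_bounds (a := x) h
    omega
  · have h1 := PySem.Int.mod_nonneg (a := x) h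
    have h2 := PySem.Int.mod_lt (a := x) h
    omega

-- `g = gcd(a,b); while g != 1: a //= g; b //= g; g = gcd(a,b)` (fuel makes the loop total)
def reduceA : Nat → Int → Int → Int × Int
  | 0, a, b => (a, b)
  | f + 1, a, b =>
    let g := gcdA a b
    if g ≠ 1 then reduceA f (PySem.Int.floordiv a g) (PySem.Int.floordiv b g)
    else (a, b)

-- the `while True:` body of can_pair (fuel makes the loop total; inside Pre_ it is proved sufficient)
def canPairLoopA : Nat → Int → Int → Bool
  | 0, _, _ => true
  | f + 1, a, b =>
    if a = b then false
    else
      let p := reduceA (a.natAbs + b.natAbs + 1) a b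
      if PySem.Int.mod (p.1 + p.2) 2 = 1 then true
      else canPairLoopA f (max p.1 p.2 - min p.1 p.2) (2 * min p.1 p.2)

def canPairA (a b : Int) : Bool := canPairLoopA (a.natAbs + b.natAbs + 1) a b

-- adj[i].add(j); adj[j].add(i) guarded by can_pair
def adjStepA (bl : List Int) (adj : List (PySem.Set Int)) (i j : Nat) : List (PySem.Set Int) :=
  if canPairA (bl.getD i 0) (bl.getD j 0) then
    let adj1 := adj.set i (PySem.Set.add (adj.getD i []) (j : Int))
    adj1.set j (PySem.Set.add (adj1.getD j []) (i : Int))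
  else adj

-- `for i in range(n): for j in range(i+1, n): …`
def buildAdjA (bl : List Int) (n : Nat) : List (PySem.Set Int) :=
  (List.range n).foldl
    (fun adj i => (List.range' (i + 1) (n - (i + 1))).foldl (fun a j => adjStepA bl a i j) adj)
    (List.replicate n [])

-- dfs: fuel n+1 bounds the recursion depth (each recursive call happens after marking one
-- more vertex visited, so depth ≤ n+1); returns (found, matching, visited)
mutual
def dfsA (n : Nat) (adj : List (PySem.Set Int)) :
    Nat → Nat → List Int → List Bool → Bool × List Int × List Bool
  | 0, _, m, vis => (false, m, vis)
  | f + 1, u, m, vis => dfsLoopA n adj f (List.range n) u m vis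
  termination_by f _ _ _ => (f, 0)

def dfsLoopA (n : Nat) (adj : List (PySem.Set Int)) :
    Nat → List Nat → Nat → List Int → List Bool → Bool × List Int × List Bool
  | _, [], _, m, vis => (false, m, vis)
  | f, v :: vs, u, m, vis =>
    if ((v : Int) ∈ adj.getD u []) ∧ ¬(vis.getD v false) then
      let vis1 := vis.set v true
      if m.getD v (-1) = -1 then (true, m.set v (u : Int), vis1)
      else
        match dfsA n adj f (m.getD v (-1)).toNat m vis1 with
        | (true, m1, vis2) => (true, m1.set v (u : Int), vis2)
        | (false, m1, vis2) => dfsLoopA n adj f vs u m1 vis2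
    else dfsLoopA n adj f vs u m vis
  termination_by f vs _ _ _ => (f, vs.length + 1)
end

def solution (banana_list : List Int) : Int :=
  let n := banana_list.length
  let adj := buildAdjA banana_list n
  let r := (List.range n).foldl
    (fun (st : List Int × Nat) u =>
      match dfsA n adj (n + 1) u st.1 (List.replicate n false) with
      | (true, m1, _) => (m1, st.2 + 1)
      | (false, m1, _) => (m1, st.2))
    (List.replicate n (-1), 0)
  (n : Int) - 2 * PySem.Int.floordiv (r.2 : Int) 2

-- ===== PORT B =====
-- `while s % 2 == 0: s //= 2` (fuel makes the loop total)
def oddLoopB : Nat → Int → Int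
  | 0, s => s
  | f + 1, s => if PySem.Int.mod s 2 = 0 then oddLoopB f (PySem.Int.floordiv s 2) else s

-- closed-form test: the odd part of (a+b)//gcd(a,b) is > 1
def canPairB (a b : Int) : Bool :=
  let s := PySem.Int.floordiv (a + b) (gcdA a b)
  decide (oddLoopB (s.natAbs + 1) s ≠ 1)

mutual
def dfsB (bl : List Int) (n : Nat) :
    Nat → Nat → List Int → List Bool → Bool × List Int × List Bool
  | 0, _, m, vis => (false, m, vis)
  | f + 1, u, m, vis => dfsLoopB bl n f (List.range n) u m vis
  termination_by f _ _ _ => (f, 0)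

def dfsLoopB (bl : List Int) (n : Nat) :
    Nat → List Nat → Nat → List Int → List Bool → Bool × List Int × List Bool
  | _, [], _, m, vis => (false, m, vis)
  | f, v :: vs, u, m, vis =>
    if ¬(vis.getD v false) ∧ canPairB (bl.getD u 0) (bl.getD v 0) then
      let vis1 := vis.set v true
      if m.getD v (-1) = -1 then (true, m.set v (u : Int), vis1)
      else
        match dfsB bl n f (m.getD v (-1)).toNat m vis1 with
        | (true, m1, vis2) => (true, m1.set v (u : Int), vis2)
        | (false, m1, vis2) => dfsLoopB bl n f vs u m1 vis2
    else dfsLoopB bl n f vs u m vis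
  termination_by f vs _ _ _ => (f, vs.length + 1)
end

def solution_alt (banana_list : List Int) : Int :=
  let n := banana_list.length
  let r := (List.range n).foldl
    (fun (st : List Int × Nat) u =>
      match dfsB banana_list n (n + 1) u st.1 (List.replicate n false) with
      | (true, m1, _) => (m1, st.2 + 1)
      | (false, m1, _) => (m1, st.2))
    (List.replicate n (-1), 0)
  (n : Int) - 2 * PySem.Int.floordiv (r.2 : Int) 2

-- ===== PRECONDITION & SPEC =====
-- Pre_ admits lists whose entries are all positive (the problem's stated domain: banana counts)
-- or all negative; it excludes lists mixing signs or containing 0: on many of those A's simulation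
-- diverges, on lists containing 0 B's gcd-based test divides by zero, and on mixed-sign lists
-- where A happens to return, A's value is an accident of the simulation that B does not reproduce.
def Pre_solution (banana_list : List Int) : Prop :=
  (∀ x ∈ banana_list, 1 ≤ x) ∨ (∀ x ∈ banana_list, x ≤ -1)
instance (banana_list : List Int) : Decidable (Pre_solution banana_list) := by
  unfold Pre_solution; infer_instance

def pvWitness_solution : List Int := [1, 7, 3, 21, 13, 19]

def Spec_solution (banana_list : List Int) (out : Int) : Prop := out = solution_alt banana_list
instance (banana_list : List Int) (out : Int) : Decidable (Spec_solution banana_list out) := by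
  unfold Spec_solution; infer_instance

-- ===== CLAIM (what is proved, stated in full; the proofs are below) =====
def Claim_equal_solution : Prop := ∀ (banana_list : List Int), Dom_solution banana_list →
  Pre_solution banana_list → Spec_solution banana_list (solution banana_list)

-- ===== LEMMAS AND PROOFS =====

theorem gcdA_eq (x y : Int) (hx : 0 ≤ x) (hy : 0 ≤ y) : gcdA x y = (Int.gcd x y : Int) := by
  rw [gcdA]
  split
  · next h =>
    subst h
    simp [Int.gcd]
    exact (abs_of_nonneg hx).symm
  · next h =>
    have hpos : 0 < y := lt_of_le_of_ne hy (Ne.symm h)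
    rw [PySem.Int.mod_eq_emod_of_pos hpos]
    rw [gcdA_eq y (x % y) hy (Int.emod_nonneg x (by omega))]
    rw [Int.gcd_comm, Int.gcd_emod x y]
termination_by y.natAbs
decreasing_by
  rename_i h
  have hpos : 0 < y := by omega
  have h2 := Int.emod_nonneg x (b := y) (by omega)
  have h3 := Int.emod_lt_of_pos x hpos
  omega

theorem reduceA_eq (f : Nat) (a b : Int) (ha : 1 ≤ a) (hb : 1 ≤ b) (hf : 2 ≤ f) :
    reduceA f a b = (a / (Int.gcd a b : Int), b / (Int.gcd a b : Int)) := by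
  obtain ⟨f, rfl⟩ : ∃ f', f = f' + 2 := ⟨f - 2, by omega⟩
  have hg : gcdA a b = (Int.gcd a b : Int) := gcdA_eq a b (by omega) (by omega)
  have hgpos : 0 < Int.gcd a b := Int.gcd_pos_of_ne_zero_left b (by omega)
  by_cases h1 : Int.gcd a b = 1
  · rw [reduceA]
    simp [hg, h1]
  · have hg2 : 2 ≤ (Int.gcd a b : Int) := by exact_mod_cast by omega
    have hda := Int.gcd_dvd_left (a := a) (b := b)
    have hdb := Int.gcd_dvd_right (a := a) (b := b)
    have hfa : PySem.Int.floordiv a (Int.gcd a b : Int) = a / (Int.gcd a b : Int) :=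
      PySem.Int.floordiv_eq_ediv_of_pos (by omega)
    have hfb : PySem.Int.floordiv b (Int.gcd a b : Int) = b / (Int.gcd a b : Int) :=
      PySem.Int.floordiv_eq_ediv_of_pos (by omega)
    have hco : Int.gcd (a / (Int.gcd a b : Int)) (b / (Int.gcd a b : Int)) = 1 :=
      Int.gcd_ediv_gcd_ediv_gcd hgpos
    rw [reduceA]
    simp only [hg]
    rw [if_pos (by exact_mod_cast h1)]
    rw [hfa, hfb, reduceA]
    have hg' : gcdA (a / (Int.gcd a b : Int)) (b / (Int.gcd a b : Int)) =
        (Int.gcd (a / (Int.gcd a b : Int)) (b / (Int.gcd a b : Int)) : Int) := by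
      apply gcdA_eq <;> positivity
    simp [hg', hco]

theorem gcd_sub_two (p q : Nat) (hq : 0 < q) (hlt : q < p) (hco : Nat.gcd p q = 1)
    (hpo : p % 2 = 1) (hqo : q % 2 = 1) : Nat.gcd (p - q) (2 * q) = 2 := by
  have h1 : Nat.gcd (p - q) q = 1 := by
    rw [Nat.gcd_sub_self_left (le_of_lt hlt)]; exact hco
  have hco2 : Nat.Coprime (Nat.gcd (p - q) (2 * q)) q :=
    Nat.Coprime.coprime_dvd_left (Nat.gcd_dvd_left _ _) h1
  have hd2 : Nat.gcd (p - q) (2 * q) ∣ 2 :=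
    Nat.Coprime.dvd_of_dvd_mul_right hco2 (Nat.gcd_dvd_right _ _)
  have h2d : 2 ∣ Nat.gcd (p - q) (2 * q) :=
    Nat.dvd_gcd (by omega) ⟨q, rfl⟩
  exact Nat.dvd_antisymm hd2 h2d

theorem gcd_step_int (a b : Int) (ha : 1 ≤ a) (hb : 1 ≤ b) (hne : a ≠ b)
    (hco : Int.gcd a b = 1) (hao : ¬ (2:Int) ∣ a) (hbo : ¬ (2:Int) ∣ b) :
    Int.gcd (max a b - min a b) (2 * min a b) = 2 := by
  rcases lt_or_gt_of_ne hne with h | h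
  · -- a < b : max = b, min = a
    rw [max_eq_right (le_of_lt h), min_eq_left (le_of_lt h)]
    have : b - a = ((b.toNat - a.toNat : Nat) : Int) := by omega
    rw [this]
    have : 2 * a = ((2 * a.toNat : Nat) : Int) := by omega
    rw [this, Int.gcd_natCast_natCast]
    apply gcd_sub_two b.toNat a.toNat (by omega) (by omega)
    · rw [Nat.gcd_comm]
      have := Int.gcd_natCast_natCast a.toNat b.toNat
      rw [show ((a.toNat : Int)) = a by omega, show ((b.toNat : Int)) = b by omega] at this
      omega
    · omega
    · omega
  · rw [max_eq_left (le_of_lt h), min_eq_right (le_of_lt h)]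
    have h1 : a - b = ((a.toNat - b.toNat : Nat) : Int) := by omega
    rw [h1]
    have h2 : 2 * b = ((2 * b.toNat : Nat) : Int) := by omega
    rw [h2, Int.gcd_natCast_natCast]
    apply gcd_sub_two a.toNat b.toNat (by omega) (by omega)
    · have := Int.gcd_natCast_natCast a.toNat b.toNat
      rw [show ((a.toNat : Int)) = a by omega, show ((b.toNat : Int)) = b by omega] at this
      omega
    · omega
    · omega

def oddPartN (n : Nat) : Nat :=
  if n = 0 then 0 else if n % 2 = 0 then oddPartN (n / 2) else n
termination_by n
decreasing_by omega

def specCan (a b : Int) : Bool := decide (oddPartN ((a + b).toNat / Int.gcd a b) ≠ 1)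

theorem oddPartN_even (n : Nat) (h0 : n ≠ 0) (h2 : n % 2 = 0) : oddPartN n = oddPartN (n / 2) := by
  rw [oddPartN]; simp [h0, h2]

theorem oddPartN_odd (n : Nat) (h2 : n % 2 = 1) : oddPartN n = n := by
  rw [oddPartN]; simp [h2]; omega

theorem canPairLoopA_eq (f : Nat) : ∀ a b : Int, 1 ≤ a → 1 ≤ b →
    (a + b).toNat / Int.gcd a b ≤ f → canPairLoopA f a b = specCan a b := by
  induction f with
  | zero =>
    intro a b ha hb hf
    exfalso
    have hgpos : 0 < Int.gcd a b := Int.gcd_pos_of_ne_zero_left b (by omega)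
    have hda := Int.gcd_dvd_left (a := a) (b := b)
    have hdb := Int.gcd_dvd_right (a := a) (b := b)
    have h1 : (Int.gcd a b : Int) ∣ (a + b) := Dvd.dvd.add hda hdb
    have h2 : ((Int.gcd a b : Int)) ≤ a + b := Int.le_of_dvd (by omega) h1
    have h3 : 0 < (a + b).toNat / Int.gcd a b := Nat.div_pos (by omega) hgpos
    omega
  | succ f ih =>
    intro a b ha hb hf
    rw [canPairLoopA]
    by_cases hab : a = b
    · subst hab
      have hk : (a + a).toNat / Int.gcd a a = 2 := by
        rw [Int.gcd_self]
        have h1 : (a + a).toNat = 2 * a.natAbs := by omega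
        rw [h1, Nat.mul_div_assoc 2 (dvd_refl _), Nat.div_self (by omega)]
      simp only [specCan, hk]
      rw [oddPartN_even 2 (by omega) (by omega)]
      norm_num
      rw [oddPartN_odd 1 (by omega)]
    · rw [if_neg hab]
      -- notation
      set g : Nat := Int.gcd a b with hgdef
      have hgpos : 0 < g := Int.gcd_pos_of_ne_zero_left b (by omega)
      have hda : (g : Int) ∣ a := Int.gcd_dvd_left a b
      have hdb : (g : Int) ∣ b := Int.gcd_dvd_right a b
      set k : Nat := (a + b).toNat / g with hkdef
      set a₁ : Int := a / (g : Int) with ha₁def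
      set b₁ : Int := b / (g : Int) with hb₁def
      have hred : reduceA (a.natAbs + b.natAbs + 1) a b = (a₁, b₁) :=
        reduceA_eq _ a b ha hb (by omega)
      have ea : (g : Int) * a₁ = a := Int.mul_ediv_cancel' hda
      have eb : (g : Int) * b₁ = b := Int.mul_ediv_cancel' hdb
      have ha₁ : 1 ≤ a₁ := by nlinarith [ea, ha, hgpos]
      have hb₁ : 1 ≤ b₁ := by nlinarith [eb, hb, hgpos]
      have hsum : a₁ + b₁ = (k : Int) := by
        rw [ha₁def, hb₁def, ← Int.add_ediv_of_dvd_left hda, hkdef]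
        rw [Int.natCast_div]
        congr 1
        omega
      have hk2 : 2 ≤ k := by omega
      have hco : Int.gcd a₁ b₁ = 1 := Int.gcd_ediv_gcd_ediv_gcd hgpos
      have hne₁ : a₁ ≠ b₁ := by
        intro h; apply hab; rw [← ea, ← eb, h]
      rw [hred]
      simp only []
      have hmod : PySem.Int.mod (a₁ + b₁) 2 = ((k % 2 : Nat) : Int) := by
        rw [hsum]
        exact_mod_cast PySem.Int.mod_natCast k 2
      by_cases hpar : k % 2 = 1
      · rw [hmod, if_pos (by exact_mod_cast hpar)]
        simp only [specCan]
        rw [oddPartN_odd k hpar]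
        simp
        omega
      · rw [hmod, if_neg (by exact_mod_cast hpar)]
        -- even case: both a₁ b₁ odd, transform halves k
        have hke : k % 2 = 0 := by omega
        have hao : ¬ (2:Int) ∣ a₁ := by
          intro h2a
          have h2b : (2:Int) ∣ b₁ := by
            have : (2:Int) ∣ (k : Int) := by
              exact_mod_cast Int.natCast_dvd_natCast.mpr (Nat.dvd_of_mod_eq_zero hke)
            omega
          have := Int.dvd_gcd h2a h2b
          rw [hco] at this
          norm_num at this
        have hbo : ¬ (2:Int) ∣ b₁ := by
          intro h2b
          have h2a : (2:Int) ∣ a₁ := by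
            have : (2:Int) ∣ (k : Int) := by
              exact_mod_cast Int.natCast_dvd_natCast.mpr (Nat.dvd_of_mod_eq_zero hke)
            omega
          have := Int.dvd_gcd h2a h2b
          rw [hco] at this
          norm_num at this
        have hg2 : Int.gcd (max a₁ b₁ - min a₁ b₁) (2 * min a₁ b₁) = 2 :=
          gcd_step_int a₁ b₁ ha₁ hb₁ hne₁ hco hao hbo
        have hsum2 : (max a₁ b₁ - min a₁ b₁) + 2 * min a₁ b₁ = (k : Int) := by
          have := max_add_min a₁ b₁
          omega
        have hmin1 : 1 ≤ min a₁ b₁ := le_min ha₁ hb₁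
        have hmax : min a₁ b₁ < max a₁ b₁ := by
          rcases lt_or_gt_of_ne hne₁ with h | h
          · rw [min_eq_left (le_of_lt h), max_eq_right (le_of_lt h)]; exact h
          · rw [min_eq_right (le_of_lt h), max_eq_left (le_of_lt h)]; exact h
        have hk2' : ((max a₁ b₁ - min a₁ b₁) + 2 * min a₁ b₁).toNat / Int.gcd (max a₁ b₁ - min a₁ b₁) (2 * min a₁ b₁) = k / 2 := by
          rw [hg2, hsum2]
          simp
        have hih := ih (max a₁ b₁ - min a₁ b₁) (2 * min a₁ b₁) (by omega) (by omega)
          (by rw [hk2']; omega)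
        rw [hih]
        simp only [specCan, hk2']
        rw [oddPartN_even k (by omega) hke]

theorem canPairA_eq_spec (a b : Int) (ha : 1 ≤ a) (hb : 1 ≤ b) : canPairA a b = specCan a b := by
  apply canPairLoopA_eq _ a b ha hb
  calc (a + b).toNat / Int.gcd a b ≤ (a + b).toNat := Nat.div_le_self _ _
    _ ≤ a.natAbs + b.natAbs + 1 := by omega

theorem oddLoopB_eq (f : Nat) : ∀ m : Nat, 0 < m → m ≤ f → oddLoopB f (m : Int) = (oddPartN m : Int) := by
  induction f with
  | zero => intro m h1 h2; omega
  | succ f ih =>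
    intro m h1 h2
    rw [oddLoopB]
    have hmod : PySem.Int.mod (m : Int) 2 = ((m % 2 : Nat) : Int) :=
      by exact_mod_cast PySem.Int.mod_natCast m 2
    by_cases hp : m % 2 = 0
    · rw [hmod, if_pos (by exact_mod_cast hp)]
      have hdiv : PySem.Int.floordiv (m : Int) 2 = ((m / 2 : Nat) : Int) :=
        by exact_mod_cast PySem.Int.floordiv_natCast m 2
      rw [hdiv, ih (m / 2) (by omega) (by omega), oddPartN_even m (by omega) hp]
    · rw [hmod, if_neg (by exact_mod_cast hp), oddPartN_odd m (by omega)]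

theorem canPairB_eq_spec (a b : Int) (ha : 1 ≤ a) (hb : 1 ≤ b) : canPairB a b = specCan a b := by
  have hgpos : 0 < Int.gcd a b := Int.gcd_pos_of_ne_zero_left b (by omega)
  have hg : gcdA a b = (Int.gcd a b : Int) := gcdA_eq a b (by omega) (by omega)
  set k : Nat := (a + b).toNat / Int.gcd a b with hkdef
  have hs : PySem.Int.floordiv (a + b) (gcdA a b) = (k : Int) := by
    rw [hg, PySem.Int.floordiv_eq_ediv_of_pos (by exact_mod_cast hgpos), hkdef,
      Int.natCast_div]
    congr 1
    omega
  have hk1 : 1 ≤ k := by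
    have hda := Int.gcd_dvd_left a b
    have hdb := Int.gcd_dvd_right a b
    have h1 : (Int.gcd a b : Int) ∣ (a + b) := Dvd.dvd.add hda hdb
    have h2 : ((Int.gcd a b : Int)) ≤ a + b := Int.le_of_dvd (by omega) h1
    have h3 : 0 < (a + b).toNat / Int.gcd a b := Nat.div_pos (by omega) hgpos
    omega
  simp only [canPairB, hs, specCan, ← hkdef]
  have : (k : Int).natAbs = k := by omega
  rw [this, oddLoopB_eq (k + 1) k hk1 (by omega)]
  simp

theorem getD_set_self (l : List (PySem.Set Int)) (i : Nat) (x : PySem.Set Int) (h : i < l.length) :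
    (l.set i x).getD i [] = x := by simp [List.getD, h]

theorem getD_set_ne (l : List (PySem.Set Int)) (i j : Nat) (x : PySem.Set Int) (h : j ≠ i) :
    (l.set i x).getD j [] = l.getD j [] := by
  simp [List.getD, List.getElem?_set_ne (Ne.symm h)]

theorem length_adjStepA (bl adj) (i j : Nat) : (adjStepA bl adj i j).length = adj.length := by
  rw [adjStepA]; split <;> simp

theorem mem_adjStepA (bl : List Int) (adj : List (PySem.Set Int)) (i j u v : Nat)
    (hi : i < adj.length) (hj : j < adj.length) (hij : i ≠ j) :
    ((v : Int) ∈ (adjStepA bl adj i j).getD u []) ↔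
      ((v : Int) ∈ adj.getD u []) ∨
        (canPairA (bl.getD i 0) (bl.getD j 0) = true ∧ ((u = i ∧ v = j) ∨ (u = j ∧ v = i))) := by
  rw [adjStepA]
  split
  · next hP =>
    by_cases hu : u = j
    · subst hu
      rw [getD_set_self _ _ _ (by simpa using hj)]
      rw [PySem.Set.mem_add, getD_set_ne _ _ _ _ hij.symm]
      constructor
      · rintro (h | h)
        · exact Or.inl h
        · exact Or.inr ⟨hP, Or.inr ⟨rfl, by exact_mod_cast h⟩⟩
      · rintro (h | ⟨_, (⟨hui, hvj⟩ | ⟨_, hvi⟩)⟩)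
        · exact Or.inl h
        · exact absurd hui hij.symm
        · exact Or.inr (by exact_mod_cast hvi)
    · rw [getD_set_ne _ _ _ _ hu]
      by_cases hu' : u = i
      · subst hu'
        rw [getD_set_self _ _ _ hi, PySem.Set.mem_add]
        constructor
        · rintro (h | h)
          · exact Or.inl h
          · exact Or.inr ⟨hP, Or.inl ⟨rfl, by exact_mod_cast h⟩⟩
        · rintro (h | ⟨_, (⟨_, hvj⟩ | ⟨hui, _⟩)⟩)
          · exact Or.inl h
          · exact Or.inr (by exact_mod_cast hvj)
          · exact absurd hui hij
      · rw [getD_set_ne _ _ _ _ hu']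
        constructor
        · exact Or.inl
        · rintro (h | ⟨_, (⟨hui, _⟩ | ⟨huj, _⟩)⟩)
          · exact h
          · exact absurd hui hu'
          · exact absurd huj hu
  · next hP =>
    constructor
    · exact Or.inl
    · rintro (h | ⟨hc, _⟩)
      · exact h
      · exact absurd hc (by simpa using hP)

theorem length_innerFoldA (bl : List Int) (i : Nat) :
    ∀ (js : List Nat) (adj : List (PySem.Set Int)),
      (js.foldl (fun a j => adjStepA bl a i j) adj).length = adj.length := by
  intro js
  induction js with
  | nil => intro adj; rfl
  | cons j js ih => intro adj; rw [List.foldl_cons, ih, length_adjStepA]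

theorem mem_innerFoldA (bl : List Int) (i : Nat) :
    ∀ (js : List Nat) (adj : List (PySem.Set Int)),
      i < adj.length → (∀ j ∈ js, j < adj.length ∧ i ≠ j) → ∀ u v : Nat,
      (((v : Int) ∈ (js.foldl (fun a j => adjStepA bl a i j) adj).getD u []) ↔
        ((v : Int) ∈ adj.getD u []) ∨
          (∃ j ∈ js, canPairA (bl.getD i 0) (bl.getD j 0) = true ∧
            ((u = i ∧ v = j) ∨ (u = j ∧ v = i)))) := by
  intro js
  induction js with
  | nil => intro adj _ _ u v; simp
  | cons j js ih =>
    intro adj hi hjs u v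
    rw [List.foldl_cons]
    rw [ih _ (by rw [length_adjStepA]; exact hi)
      (by intro j' hj'; rw [length_adjStepA]; exact hjs j' (List.mem_cons_of_mem _ hj'))]
    rw [mem_adjStepA bl adj i j u v hi (hjs j (List.mem_cons_self)).1 (hjs j (List.mem_cons_self)).2]
    constructor
    · rintro ((h | h) | ⟨j', hj', h⟩)
      · exact Or.inl h
      · exact Or.inr ⟨j, List.mem_cons_self, h⟩
      · exact Or.inr ⟨j', List.mem_cons_of_mem _ hj', h⟩
    · rintro (h | ⟨j', hj', h⟩)
      · exact Or.inl (Or.inl h)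
      · rcases List.mem_cons.mp hj' with rfl | hj'
        · exact Or.inl (Or.inr h)
        · exact Or.inr ⟨j', hj', h⟩

theorem outerFoldA (bl : List Int) (n : Nat) :
    ∀ (is : List Nat) (adj : List (PySem.Set Int)), adj.length = n → (∀ i ∈ is, i < n) →
      (((is.foldl (fun adj i =>
          (List.range' (i + 1) (n - (i + 1))).foldl (fun a j => adjStepA bl a i j) adj) adj).length = n) ∧
       (∀ u v : Nat,
        (((v : Int) ∈ (is.foldl (fun adj i =>
            (List.range' (i + 1) (n - (i + 1))).foldl (fun a j => adjStepA bl a i j) adj) adj).getD u []) ↔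
          ((v : Int) ∈ adj.getD u []) ∨
            (∃ i ∈ is, ∃ j : Nat, i < j ∧ j < n ∧ canPairA (bl.getD i 0) (bl.getD j 0) = true ∧
              ((u = i ∧ v = j) ∨ (u = j ∧ v = i)))))) := by
  intro is
  induction is with
  | nil => intro adj hlen _; simpa using hlen
  | cons i is ih =>
    intro adj hlen his
    have hi : i < n := his i List.mem_cons_self
    have hjs : ∀ j ∈ List.range' (i + 1) (n - (i + 1)), j < adj.length ∧ i ≠ j := by
      intro j hj
      rw [List.mem_range'_1] at hj
      omega
    have hlen1 : ((List.range' (i + 1) (n - (i + 1))).foldl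
        (fun a j => adjStepA bl a i j) adj).length = n := by
      rw [length_innerFoldA]; exact hlen
    rw [List.foldl_cons]
    obtain ⟨ihlen, ihmem⟩ := ih _ hlen1 (fun i' hi' => his i' (List.mem_cons_of_mem _ hi'))
    refine ⟨ihlen, fun u v => ?_⟩
    rw [ihmem u v, mem_innerFoldA bl i _ adj (by omega) hjs u v]
    constructor
    · rintro ((h | ⟨j, hj, h⟩) | ⟨i', hi', h⟩)
      · exact Or.inl h
      · rw [List.mem_range'_1] at hj
        exact Or.inr ⟨i, List.mem_cons_self, j, by omega, by omega, h⟩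
      · exact Or.inr ⟨i', List.mem_cons_of_mem _ hi', h⟩
    · rintro (h | ⟨i', hi', j, hij, hjn, h⟩)
      · exact Or.inl (Or.inl h)
      · rcases List.mem_cons.mp hi' with rfl | hi'
        · exact Or.inl (Or.inr ⟨j, by rw [List.mem_range'_1]; omega, h⟩)
        · exact Or.inr ⟨i', hi', j, hij, hjn, h⟩

theorem mem_buildAdjA (bl : List Int) (n : Nat) (u v : Nat) :
    ((v : Int) ∈ (buildAdjA bl n).getD u []) ↔
      (∃ i j : Nat, i < j ∧ j < n ∧ canPairA (bl.getD i 0) (bl.getD j 0) = true ∧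
        ((u = i ∧ v = j) ∨ (u = j ∧ v = i))) := by
  rw [buildAdjA, (outerFoldA bl n (List.range n) _ (by simp) (by simp)).2 u v]
  constructor
  · rintro (h | ⟨i, hi, j, hij, hjn, h⟩)
    · simp [List.getD] at h
    · exact ⟨i, j, hij, hjn, h⟩
  · rintro ⟨i, j, hij, hjn, h⟩
    exact Or.inr ⟨i, by simp; omega, j, hij, hjn, h⟩

theorem specCan_symm (a b : Int) : specCan a b = specCan b a := by
  simp [specCan, Int.gcd_comm, add_comm]

theorem specCan_self (a : Int) (ha : 1 ≤ a) : specCan a a = false := by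
  have hk : (a + a).toNat / Int.gcd a a = 2 := by
    rw [Int.gcd_self]
    have h1 : (a + a).toNat = 2 * a.natAbs := by omega
    rw [h1, Nat.mul_div_assoc 2 (dvd_refl _), Nat.div_self (by omega)]
  simp only [specCan, hk]
  rw [oddPartN_even 2 (by omega) (by omega)]
  norm_num
  rw [oddPartN_odd 1 (by omega)]

theorem cond_iff (bl : List Int) (hpre : ∀ x ∈ bl, 1 ≤ x) (u v : Nat)
    (hu : u < bl.length) (hv : v < bl.length) :
    (((v : Int) ∈ (buildAdjA bl bl.length).getD u []) ↔
      canPairB (bl.getD u 0) (bl.getD v 0) = true) := by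
  have hmem : ∀ i : Nat, i < bl.length → 1 ≤ bl.getD i 0 := by
    intro i hi
    apply hpre
    rw [List.getD_eq_getElem bl 0 hi]
    exact List.getElem_mem hi
  have hB : ∀ i j : Nat, i < bl.length → j < bl.length →
      canPairB (bl.getD i 0) (bl.getD j 0) = specCan (bl.getD i 0) (bl.getD j 0) :=
    fun i j hi hj => canPairB_eq_spec _ _ (hmem i hi) (hmem j hj)
  have hA : ∀ i j : Nat, i < bl.length → j < bl.length →
      canPairA (bl.getD i 0) (bl.getD j 0) = specCan (bl.getD i 0) (bl.getD j 0) :=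
    fun i j hi hj => canPairA_eq_spec _ _ (hmem i hi) (hmem j hj)
  rw [mem_buildAdjA, hB u v hu hv]
  constructor
  · rintro ⟨i, j, hij, hjn, hP, (⟨rfl, rfl⟩ | ⟨rfl, rfl⟩)⟩
    · rw [← hA u v (by omega) hjn]; exact hP
    · rw [specCan_symm, ← hA v u hv (by omega)]; exact hP
  · intro h
    by_cases huv : u = v
    · subst huv
      rw [specCan_self _ (hmem u hu)] at h
      exact absurd h (by simp)
    · rcases Nat.lt_or_ge u v with hlt | hge
      · exact ⟨u, v, hlt, hv, by rw [hA u v hu hv]; exact h, Or.inl ⟨rfl, rfl⟩⟩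
      · have hlt : v < u := by omega
        exact ⟨v, u, hlt, hu, by rw [hA v u hv hu, specCan_symm]; exact h, Or.inr ⟨rfl, rfl⟩⟩

def InvM (n : Nat) (m : List Int) : Prop := ∀ x ∈ m, x = -1 ∨ (0 ≤ x ∧ x.toNat < n)

theorem invM_set (n : Nat) (m : List Int) (v u : Nat) (hu : u < n) (hm : InvM n m) :
    InvM n (m.set v (u : Int)) := by
  intro x hx
  rcases List.mem_or_eq_of_mem_set hx with hx | rfl
  · exact hm x hx
  · right; constructor
    · exact Int.natCast_nonneg u
    · simpa using hu

theorem dfsLoop_eq (bl : List Int)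
    (hcond : ∀ u v : Nat, u < bl.length → v < bl.length →
      (((v : Int) ∈ (buildAdjA bl bl.length).getD u []) ↔
        canPairB (bl.getD u 0) (bl.getD v 0) = true)) (f : Nat)
    (ihf : ∀ (u : Nat) (m : List Int) (vis : List Bool), u < bl.length → InvM bl.length m →
      dfsA bl.length (buildAdjA bl bl.length) f u m vis = dfsB bl bl.length f u m vis ∧
        InvM bl.length (dfsA bl.length (buildAdjA bl bl.length) f u m vis).2.1) :
    ∀ (vs : List Nat) (u : Nat) (m : List Int) (vis : List Bool),
      (∀ v ∈ vs, v < bl.length) → u < bl.length → InvM bl.length m →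
      dfsLoopA bl.length (buildAdjA bl bl.length) f vs u m vis =
          dfsLoopB bl bl.length f vs u m vis ∧
        InvM bl.length (dfsLoopA bl.length (buildAdjA bl bl.length) f vs u m vis).2.1 := by
  intro vs
  induction vs with
  | nil =>
    intro u m vis _ _ hm
    rw [dfsLoopA, dfsLoopB]
    exact ⟨rfl, hm⟩
  | cons v vs ih =>
    intro u m vis hvs hu hm
    have hv : v < bl.length := hvs v List.mem_cons_self
    have hcond : (((v : Int) ∈ (buildAdjA bl bl.length).getD u []) ∧ ¬(vis.getD v false)) ↔
        (¬(vis.getD v false) ∧ canPairB (bl.getD u 0) (bl.getD v 0)) := by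
      rw [hcond u v hu hv]
      tauto
    rw [dfsLoopA, dfsLoopB]
    by_cases hc : ((v : Int) ∈ (buildAdjA bl bl.length).getD u []) ∧ ¬(vis.getD v false)
    · rw [if_pos hc, if_pos (hcond.mp hc)]
      dsimp only
      by_cases hmv : m.getD v (-1) = -1
      · rw [if_pos hmv, if_pos hmv]
        exact ⟨rfl, invM_set _ _ _ _ hu hm⟩
      · rw [if_neg hmv, if_neg hmv]
        have hu' : (m.getD v (-1)).toNat < bl.length := by
          by_cases hvlen : v < m.length
          · have hmem : m.getD v (-1) ∈ m := by
              rw [List.getD_eq_getElem m (-1) hvlen]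
              exact List.getElem_mem hvlen
            rcases hm _ hmem with h | ⟨h1, h2⟩
            · exact absurd h hmv
            · exact h2
          · exfalso
            apply hmv
            rw [List.getD_eq_default]
            omega
        obtain ⟨hAB, hInv'⟩ := ihf (m.getD v (-1)).toNat m (vis.set v true) hu' hm
        rw [← hAB]
        generalize hr : dfsA bl.length (buildAdjA bl bl.length) f (m.getD v (-1)).toNat m
            (vis.set v true) = r
        rw [hr] at hInv'
        obtain ⟨b1, m1, vis2⟩ := r
        cases b1
        · dsimp only
          exact ih u m1 vis2 (fun v' hv' => hvs v' (List.mem_cons_of_mem _ hv')) hu hInv'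
        · dsimp only
          exact ⟨rfl, invM_set _ _ _ _ hu hInv'⟩
    · rw [if_neg hc, if_neg (fun h => hc (hcond.mpr h))]
      exact ih u m vis (fun v' hv' => hvs v' (List.mem_cons_of_mem _ hv')) hu hm

theorem dfs_eq (bl : List Int)
    (hcond : ∀ u v : Nat, u < bl.length → v < bl.length →
      (((v : Int) ∈ (buildAdjA bl bl.length).getD u []) ↔
        canPairB (bl.getD u 0) (bl.getD v 0) = true)) :
    ∀ (f : Nat) (u : Nat) (m : List Int) (vis : List Bool), u < bl.length → InvM bl.length m →
      dfsA bl.length (buildAdjA bl bl.length) f u m vis = dfsB bl bl.length f u m vis ∧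
        InvM bl.length (dfsA bl.length (buildAdjA bl bl.length) f u m vis).2.1 := by
  intro f
  induction f with
  | zero =>
    intro u m vis _ hm
    rw [dfsA, dfsB]
    exact ⟨rfl, hm⟩
  | succ f ihf =>
    intro u m vis hu hm
    rw [dfsA, dfsB]
    exact dfsLoop_eq bl hcond f ihf (List.range bl.length) u m vis (by simp) hu hm

theorem outer_eq (bl : List Int)
    (hcond : ∀ u v : Nat, u < bl.length → v < bl.length →
      (((v : Int) ∈ (buildAdjA bl bl.length).getD u []) ↔
        canPairB (bl.getD u 0) (bl.getD v 0) = true)) :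
    ∀ (us : List Nat) (st : List Int × Nat), (∀ u ∈ us, u < bl.length) → InvM bl.length st.1 →
      us.foldl (fun (st : List Int × Nat) u =>
          match dfsA bl.length (buildAdjA bl bl.length) (bl.length + 1) u st.1
              (List.replicate bl.length false) with
          | (true, m1, _) => (m1, st.2 + 1)
          | (false, m1, _) => (m1, st.2)) st =
        us.foldl (fun (st : List Int × Nat) u =>
          match dfsB bl bl.length (bl.length + 1) u st.1 (List.replicate bl.length false) with
          | (true, m1, _) => (m1, st.2 + 1)
          | (false, m1, _) => (m1, st.2)) st := by
  intro us
  induction us with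
  | nil => intro st _ _; rfl
  | cons u us ih =>
    intro st hus hst
    rw [List.foldl_cons, List.foldl_cons]
    obtain ⟨hAB, hInv'⟩ := dfs_eq bl hcond (bl.length + 1) u st.1 (List.replicate bl.length false)
      (hus u List.mem_cons_self) hst
    rw [← hAB]
    generalize hr : dfsA bl.length (buildAdjA bl bl.length) (bl.length + 1) u st.1
        (List.replicate bl.length false) = r
    rw [hr] at hInv'
    obtain ⟨b1, m1, vis2⟩ := r
    cases b1 <;>
      exact ih _ (fun u' hu' => hus u' (List.mem_cons_of_mem _ hu')) hInv'

theorem solution_eq (bl : List Int)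
    (hcond : ∀ u v : Nat, u < bl.length → v < bl.length →
      (((v : Int) ∈ (buildAdjA bl bl.length).getD u []) ↔
        canPairB (bl.getD u 0) (bl.getD v 0) = true)) : solution bl = solution_alt bl := by
  rw [solution, solution_alt]
  rw [outer_eq bl hcond (List.range bl.length) (List.replicate bl.length (-1), 0) (by simp)
    (by intro x hx; exact Or.inl (List.eq_of_mem_replicate hx))]


theorem mod_sub_floordiv (x y : Int) : PySem.Int.mod x y = x - y * PySem.Int.floordiv x y := by
  have := PySem.Int.floordiv_mul_add_mod x y
  linarith [this]

theorem gcd_mod_pysem (x y : Int) : Int.gcd y (PySem.Int.mod x y) = Int.gcd x y := by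
  rw [mod_sub_floordiv, Int.gcd_sub_mul_left_right, Int.gcd_comm]

theorem gcdA_neg (x y : Int) (hx : x ≤ 0) (hy : y ≤ 0) : gcdA x y = -(Int.gcd x y : Int) := by
  rw [gcdA]
  split
  · next h =>
    subst h
    simp [Int.gcd]
    rw [abs_of_nonpos hx]
    ring
  · next h =>
    have hmod : PySem.Int.mod x y ≤ 0 := (PySem.Int.mod_neg_bounds (a := x) (by omega)).2
    rw [gcdA_neg y (PySem.Int.mod x y) hy hmod, gcd_mod_pysem]
termination_by y.natAbs
decreasing_by
  rename_i h
  have h1 := PySem.Int.mod_neg_bounds (a := x) (b := y) (by omega)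
  omega

theorem floordiv_exact (a d : Int) (hd : d ≠ 0) (h : d ∣ a) : PySem.Int.floordiv a d = a / d := by
  have hmod : PySem.Int.mod a d = 0 := (PySem.Int.mod_eq_zero_iff_dvd a d).mpr h
  have h1 := PySem.Int.floordiv_mul_add_mod a d
  rw [hmod, add_zero] at h1
  have h2 : a / d * d = a := Int.ediv_mul_cancel h
  exact mul_right_cancel₀ hd (by rw [h1, h2])

theorem reduceA_neg (f : Nat) (a b : Int) (ha : a ≤ -1) (hb : b ≤ -1) (hf : 2 ≤ f) :
    reduceA f a b = ((-a) / (Int.gcd a b : Int), (-b) / (Int.gcd a b : Int)) := by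
  obtain ⟨f, rfl⟩ : ∃ f', f = f' + 2 := ⟨f - 2, by omega⟩
  set G : Nat := Int.gcd a b with hGdef
  have hGpos : 0 < G := Int.gcd_pos_of_ne_zero_left b (by omega)
  have hda : (G : Int) ∣ a := Int.gcd_dvd_left a b
  have hdb : (G : Int) ∣ b := Int.gcd_dvd_right a b
  have hg : gcdA a b = -(G : Int) := gcdA_neg a b (by omega) (by omega)
  have hfa : PySem.Int.floordiv a (-(G : Int)) = (-a) / (G : Int) := by
    rw [floordiv_exact a (-(G : Int)) (by omega) ((Dvd.dvd.neg_left hda)), Int.ediv_neg]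
    exact (Int.neg_ediv_of_dvd hda).symm
  have hfb : PySem.Int.floordiv b (-(G : Int)) = (-b) / (G : Int) := by
    rw [floordiv_exact b (-(G : Int)) (by omega) ((Dvd.dvd.neg_left hdb)), Int.ediv_neg]
    exact (Int.neg_ediv_of_dvd hdb).symm
  have hGn : Int.gcd (-a) (-b) = G := by rw [hGdef]; simp [Int.gcd]
  have hco : Int.gcd ((-a) / (G : Int)) ((-b) / (G : Int)) = 1 := by
    have := Int.gcd_ediv_gcd_ediv_gcd (i := -a) (j := -b) (by rw [hGn]; exact hGpos)
    rwa [hGn] at this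
  rw [reduceA]
  simp only [hg]
  rw [if_pos (by omega), hfa, hfb, reduceA]
  have hg1 : gcdA ((-a) / (G : Int)) ((-b) / (G : Int)) = (1 : Int) := by
    have h1 : (0:Int) ≤ (-a) / (G : Int) := Int.ediv_nonneg (by omega) (by omega)
    have h2 : (0:Int) ≤ (-b) / (G : Int) := Int.ediv_nonneg (by omega) (by omega)
    rw [gcdA_eq _ _ h1 h2, hco]
    rfl
  simp [hg1]

theorem canPairLoopA_neg (f : Nat) (a b : Int) (ha : a ≤ -1) (hb : b ≤ -1)
    (hf : ((-a) + (-b)).toNat / Int.gcd a b ≤ f) :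
    canPairLoopA f a b = specCan (-a) (-b) := by
  set G : Nat := Int.gcd a b with hGdef
  have hGpos : 0 < G := Int.gcd_pos_of_ne_zero_left b (by omega)
  have hGn : Int.gcd (-a) (-b) = G := by rw [hGdef]; simp [Int.gcd]
  have hda : (G : Int) ∣ a := Int.gcd_dvd_left a b
  have hdb : (G : Int) ∣ b := Int.gcd_dvd_right a b
  have hdan : (G : Int) ∣ (-a) := (dvd_neg).mpr hda
  have hdbn : (G : Int) ∣ (-b) := (dvd_neg).mpr hdb
  set k : Nat := ((-a) + (-b)).toNat / G with hkdef
  set r₁ : Int := (-a) / (G : Int) with hr₁def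
  set r₂ : Int := (-b) / (G : Int) with hr₂def
  have ea : (G : Int) * r₁ = -a := Int.mul_ediv_cancel' hdan
  have eb : (G : Int) * r₂ = -b := Int.mul_ediv_cancel' hdbn
  have hr₁ : 1 ≤ r₁ := by nlinarith [ea, ha, hGpos]
  have hr₂ : 1 ≤ r₂ := by nlinarith [eb, hb, hGpos]
  have hsum : r₁ + r₂ = (k : Int) := by
    rw [hr₁def, hr₂def, ← Int.add_ediv_of_dvd_left hdan, hkdef]
    rw [Int.natCast_div]
    congr 1
    omega
  have hk2 : 2 ≤ k := by omega
  have hco : Int.gcd r₁ r₂ = 1 := by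
    have := Int.gcd_ediv_gcd_ediv_gcd (i := -a) (j := -b) (by rw [hGn]; exact hGpos)
    rw [hGn] at this
    exact this
  obtain ⟨f, rfl⟩ : ∃ f', f = f' + 1 := ⟨f - 1, by omega⟩
  rw [canPairLoopA]
  by_cases hab : a = b
  · rw [if_pos hab]
    subst hab
    exact (specCan_self (-a) (by omega)).symm
  rw [if_neg hab]
  have hred : reduceA (a.natAbs + b.natAbs + 1) a b = (r₁, r₂) :=
    reduceA_neg _ a b ha hb (by omega)
  rw [hred]
  simp only []
  have hmod : PySem.Int.mod (r₁ + r₂) 2 = ((k % 2 : Nat) : Int) := by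
    rw [hsum]
    exact_mod_cast PySem.Int.mod_natCast k 2
  by_cases hpar : k % 2 = 1
  · rw [hmod, if_pos (by exact_mod_cast hpar)]
    simp only [specCan, hGn, ← hkdef]
    rw [oddPartN_odd k hpar]
    simp
    omega
  · rw [hmod, if_neg (by exact_mod_cast hpar)]
    have hke : k % 2 = 0 := by omega
    have hne₁ : r₁ ≠ r₂ := by
      intro h
      apply hab
      have : -a = -b := by rw [← ea, ← eb, h]
      omega
    have hdvd2k : (2:Int) ∣ (k : Int) :=
      Int.natCast_dvd_natCast.mpr (Nat.dvd_of_mod_eq_zero hke)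
    have hao : ¬ (2:Int) ∣ r₁ := by
      intro h2a
      have h2b : (2:Int) ∣ r₂ := by omega
      have := Int.dvd_gcd h2a h2b
      rw [hco] at this
      norm_num at this
    have hbo : ¬ (2:Int) ∣ r₂ := by
      intro h2b
      have h2a : (2:Int) ∣ r₁ := by omega
      have := Int.dvd_gcd h2a h2b
      rw [hco] at this
      norm_num at this
    have hg2 : Int.gcd (max r₁ r₂ - min r₁ r₂) (2 * min r₁ r₂) = 2 :=
      gcd_step_int r₁ r₂ hr₁ hr₂ hne₁ hco hao hbo
    have hsum2 : (max r₁ r₂ - min r₁ r₂) + 2 * min r₁ r₂ = (k : Int) := by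
      have := max_add_min r₁ r₂
      omega
    have hmin1 : 1 ≤ min r₁ r₂ := le_min hr₁ hr₂
    have hmax : min r₁ r₂ < max r₁ r₂ := by
      rcases lt_or_gt_of_ne hne₁ with h | h
      · rw [min_eq_left (le_of_lt h), max_eq_right (le_of_lt h)]; exact h
      · rw [min_eq_right (le_of_lt h), max_eq_left (le_of_lt h)]; exact h
    have hk2' : ((max r₁ r₂ - min r₁ r₂) + 2 * min r₁ r₂).toNat /
        Int.gcd (max r₁ r₂ - min r₁ r₂) (2 * min r₁ r₂) = k / 2 := by
      rw [hg2, hsum2]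
      simp
    have hih := canPairLoopA_eq f (max r₁ r₂ - min r₁ r₂) (2 * min r₁ r₂) (by omega) (by omega)
      (by rw [hk2']; omega)
    rw [hih]
    simp only [specCan, hk2', hGn, ← hkdef]
    rw [oddPartN_even k (by omega) hke]

theorem canPairA_neg (a b : Int) (ha : a ≤ -1) (hb : b ≤ -1) :
    canPairA a b = specCan (-a) (-b) := by
  apply canPairLoopA_neg _ a b ha hb
  calc ((-a) + (-b)).toNat / Int.gcd a b ≤ ((-a) + (-b)).toNat := Nat.div_le_self _ _
    _ ≤ a.natAbs + b.natAbs + 1 := by omega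

theorem canPairB_neg (a b : Int) (ha : a ≤ -1) (hb : b ≤ -1) :
    canPairB a b = specCan (-a) (-b) := by
  set G : Nat := Int.gcd a b with hGdef
  have hGpos : 0 < G := Int.gcd_pos_of_ne_zero_left b (by omega)
  have hGn : Int.gcd (-a) (-b) = G := by rw [hGdef]; simp [Int.gcd]
  have hda : (G : Int) ∣ a := Int.gcd_dvd_left a b
  have hdb : (G : Int) ∣ b := Int.gcd_dvd_right a b
  have hg : gcdA a b = -(G : Int) := gcdA_neg a b (by omega) (by omega)
  set k : Nat := ((-a) + (-b)).toNat / G with hkdef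
  have hs : PySem.Int.floordiv (a + b) (gcdA a b) = (k : Int) := by
    rw [hg, floordiv_exact (a + b) (-(G : Int)) (by omega)
      (Dvd.dvd.neg_left (Dvd.dvd.add hda hdb)), Int.ediv_neg,
      ← Int.neg_ediv_of_dvd (Dvd.dvd.add hda hdb)]
    rw [hkdef, Int.natCast_div]
    congr 1
    omega
  have hk1 : 1 ≤ k := by
    have h1 : (G : Int) ∣ ((-a) + (-b)) := Dvd.dvd.add ((dvd_neg).mpr hda) ((dvd_neg).mpr hdb)
    have h2 : ((G : Int)) ≤ (-a) + (-b) := Int.le_of_dvd (by omega) h1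
    have h3 : 0 < ((-a) + (-b)).toNat / G := Nat.div_pos (by omega) hGpos
    omega
  rw [canPairB]
  simp only [hs, specCan, hGn, ← hkdef]
  have h4 : (k : Int).natAbs = k := by omega
  rw [h4, oddLoopB_eq (k + 1) k hk1 (by omega)]
  simp

theorem cond_iff_neg (bl : List Int) (hneg : ∀ x ∈ bl, x ≤ -1) (u v : Nat)
    (hu : u < bl.length) (hv : v < bl.length) :
    (((v : Int) ∈ (buildAdjA bl bl.length).getD u []) ↔
      canPairB (bl.getD u 0) (bl.getD v 0) = true) := by
  have hmem : ∀ i : Nat, i < bl.length → bl.getD i 0 ≤ -1 := by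
    intro i hi
    apply hneg
    rw [List.getD_eq_getElem bl 0 hi]
    exact List.getElem_mem hi
  have hB : ∀ i j : Nat, i < bl.length → j < bl.length →
      canPairB (bl.getD i 0) (bl.getD j 0) = specCan (-(bl.getD i 0)) (-(bl.getD j 0)) :=
    fun i j hi hj => canPairB_neg _ _ (hmem i hi) (hmem j hj)
  have hA : ∀ i j : Nat, i < bl.length → j < bl.length →
      canPairA (bl.getD i 0) (bl.getD j 0) = specCan (-(bl.getD i 0)) (-(bl.getD j 0)) :=
    fun i j hi hj => canPairA_neg _ _ (hmem i hi) (hmem j hj)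
  rw [mem_buildAdjA, hB u v hu hv]
  constructor
  · rintro ⟨i, j, hij, hjn, hP, (⟨rfl, rfl⟩ | ⟨rfl, rfl⟩)⟩
    · rw [← hA u v (by omega) hjn]; exact hP
    · rw [specCan_symm, ← hA v u hv (by omega)]; exact hP
  · intro h
    by_cases huv : u = v
    · subst huv
      rw [specCan_self _ (by have := hmem u hu; omega)] at h
      exact absurd h (by simp)
    · rcases Nat.lt_or_ge u v with hlt | hge
      · exact ⟨u, v, hlt, hv, by rw [hA u v hu hv]; exact h, Or.inl ⟨rfl, rfl⟩⟩
      · have hlt : v < u := by omega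
        exact ⟨v, u, hlt, hu, by rw [hA v u hv hu, specCan_symm]; exact h, Or.inr ⟨rfl, rfl⟩⟩

-- ===== VERDICT (by name: the statement is the Claim_ definition above) =====
theorem solution_spec : Claim_equal_solution := by
  intro banana_list _ hpre
  rcases hpre with hpos | hneg
  · exact solution_eq banana_list (fun u v hu hv => cond_iff banana_list hpos u v hu hv)
  · exact solution_eq banana_list (fun u v hu hv => cond_iff_neg banana_list hneg u v hu hv)
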